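-- pv_equiv track=rewrite | github.com/marino-mulo/lojra-logjike | tools/wordle/quick_validate.py | find_all_runs
-- ===== SOURCE A (Python) =====
-- def find_all_runs(grid, size):
--     runs = []
--     for r in range(size):
--         c = 0
--         while c < size:
--             if grid[r][c] != "X":
--                 start = c; s = ""
--                 while c < size and grid[r][c] != "X":
--                     s += grid[r][c]; c += 1
--                 if len(s) >= 2: runs.append((s, r, start, "H"))
--             else: c += 1
--     for c in range(size):
--         r = 0
--         while r < size:
--             if grid[r][c] != "X":
--                 start = r; s = ""
--                 while r < size and grid[r][c] != "X":
--                     s += grid[r][c]; r += 1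
--                 if len(s) >= 2: runs.append((s, start, c, "V"))
--             else: r += 1
--     return runs
-- ===== SOURCE B (Python) =====
-- def find_all_runs(grid, size):
--     # Segment each line by the positions of its "X" separators: consecutive
--     # separator boundaries delimit the runs, no index-advancing while loops.
--     def line_runs(cells):
--         bounds = [-1] + [i for i, cell in enumerate(cells) if cell == "X"] + [len(cells)]
--         out = []
--         for a, b in zip(bounds, bounds[1:]):
--             if b - a > 1:
--                 s = "".join(cells[a + 1:b])
--                 if len(s) >= 2:
--                     out.append((s, a + 1))
--         return out
--
--     runs = []
--     for r in range(size):
--         row = [grid[r][c] for c in range(size)]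
--         runs += [(s, r, st, "H") for s, st in line_runs(row)]
--     for c in range(size):
--         col = [grid[r][c] for r in range(size)]
--         runs += [(s, st, c, "V") for s, st in line_runs(col)]
--     return runs
-- ===== Notes on version B (the rewrite author's own statement) =====
-- stated objective: alternative
-- what changed: B finds each line's runs by collecting the positions of its 'X' separators and slicing the line between consecutive boundary pairs, instead of A's index-advancing nested while loops that accumulate each run cell by cell.
import Mathlib
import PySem

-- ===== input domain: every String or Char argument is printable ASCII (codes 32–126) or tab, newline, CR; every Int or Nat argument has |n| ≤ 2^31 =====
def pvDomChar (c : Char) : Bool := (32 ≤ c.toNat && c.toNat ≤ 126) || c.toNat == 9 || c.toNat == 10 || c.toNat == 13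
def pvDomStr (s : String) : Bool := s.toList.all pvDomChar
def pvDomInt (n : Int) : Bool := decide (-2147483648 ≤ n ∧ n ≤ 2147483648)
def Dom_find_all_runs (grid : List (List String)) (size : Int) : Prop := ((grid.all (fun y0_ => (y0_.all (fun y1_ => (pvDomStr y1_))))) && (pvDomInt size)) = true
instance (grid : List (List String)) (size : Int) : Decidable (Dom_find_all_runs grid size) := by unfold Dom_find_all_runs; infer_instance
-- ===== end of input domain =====

-- B finds each line's runs from the positions of its "X" separators (boundary pairs + slices)
-- instead of A's index-advancing while loops; same cost, different decomposition (objective: alternative).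

-- ===== PORT A =====
-- inner while: 'while c < size and grid[.][c] != "X": s += grid[.][c]; c += 1'
-- fuel = size - c; returns (s, number of cells consumed)
def pvSegA (f : Nat → String) : Nat → Nat → String → String × Nat
  | 0, _, s => (s, 0)
  | fuel+1, c, s =>
    if f c ≠ "X" then
      let r := pvSegA f fuel (c+1) (s ++ f c)
      (r.1, r.2 + 1)
    else (s, 0)

theorem pvSegA_pos (f : Nat → String) (n c : Nat) (s : String) (h : f c ≠ "X") :
    1 ≤ (pvSegA f (n+1) c s).2 := by
  simp [pvSegA, h]

-- outer while: 'while c < size: …'; fuel = size - c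
def pvLoopA (f : Nat → String) : Nat → Nat → List (String × Nat)
  | 0, _ => []
  | fuel+1, c =>
    if h : f c ≠ "X" then
      let sk := pvSegA f (fuel+1) c ""
      let rest := pvLoopA f (fuel+1 - sk.2) (c + sk.2)
      if 2 ≤ PySem.Str.len sk.1 then (sk.1, c) :: rest else rest
    else pvLoopA f fuel (c+1)
  termination_by fuel _ => fuel
  decreasing_by
  · have := pvSegA_pos f fuel c "" h; omega
  · omega

def find_all_runs (grid : List (List String)) (size : Int) : List (String × Int × Int × String) :=
  let n := size.toNat
  let runsH := (List.range n).foldl (fun acc r =>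
      acc ++ (pvLoopA (fun c => (grid.getD r []).getD c "") n 0).map
        (fun p => (p.1, (r : Int), (p.2 : Int), "H"))) []
  (List.range n).foldl (fun acc c =>
      acc ++ (pvLoopA (fun r => (grid.getD r []).getD c "") n 0).map
        (fun p => (p.1, (p.2 : Int), (c : Int), "V"))) runsH

-- ===== PORT B =====
-- line_runs: separator positions → boundary pairs → slices
def pvLineB (cells : List String) : List (String × Int) :=
  let bounds : List Int := -1 :: ((PySem.List.enumerate cells).filterMap
      (fun p => if p.2 = "X" then some p.1 else none) ++ [(cells.length : Int)])
  (bounds.zip bounds.tail).filterMap (fun p =>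
    if p.2 - p.1 > 1 then
      let s := PySem.Str.join "" (PySem.List.slice cells (some (p.1 + 1)) (some p.2))
      if 2 ≤ PySem.Str.len s then some (s, p.1 + 1) else none
    else none)

def find_all_runs_alt (grid : List (List String)) (size : Int) : List (String × Int × Int × String) :=
  let n := size.toNat
  let runs := (List.range n).foldl (fun acc r =>
      acc ++ (pvLineB ((List.range n).map (fun c => (grid.getD r []).getD c ""))).map
        (fun p => (p.1, (r : Int), p.2, "H"))) []
  (List.range n).foldl (fun acc c =>
      acc ++ (pvLineB ((List.range n).map (fun r => (grid.getD r []).getD c ""))).map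
        (fun p => (p.1, p.2, (c : Int), "V"))) runs

-- ===== PRECONDITION & SPEC =====
-- Python A indexes grid[r][c] for every r,c in [0,size); outside this Pre_ it raises IndexError.
def Pre_find_all_runs (grid : List (List String)) (size : Int) : Prop :=
  size.toNat ≤ grid.length ∧ ∀ row ∈ grid.take size.toNat, size.toNat ≤ row.length
instance (grid : List (List String)) (size : Int) : Decidable (Pre_find_all_runs grid size) := by
  unfold Pre_find_all_runs; infer_instance

def pvWitness_find_all_runs : List (List String) × Int := ([["A", "B"], ["X", "C"]], 2)

def Spec_find_all_runs (grid : List (List String)) (size : Int) (out : List (String × Int × Int × String)) : Prop := out = find_all_runs_alt grid size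
instance (grid : List (List String)) (size : Int) (out : List (String × Int × Int × String)) : Decidable (Spec_find_all_runs grid size out) := by unfold Spec_find_all_runs; infer_instance

-- ===== CLAIM (what is proved, stated in full; the proofs are below) =====
def Claim_equal_find_all_runs : Prop := ∀ (grid : List (List String)) (size : Int), Dom_find_all_runs grid size → Pre_find_all_runs grid size → Spec_find_all_runs grid size (find_all_runs grid size)

-- ===== LEMMAS AND PROOFS =====

-- string join over "" separator
theorem interc_nil (l : List (List Char)) : List.intercalate [] l = l.flatten := by
  induction l with
  | nil => simp [List.intercalate]
  | cons a t ih =>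
    cases t with
    | nil => simp [List.intercalate]
    | cons b t2 =>
      simp only [List.intercalate, List.intersperse] at *
      simp_all

theorem strJoin_nil : PySem.Str.join "" [] = "" := by
  apply String.toList_inj.mp
  simp [PySem.Str.toList_join, PySem.Chars.join, interc_nil]

theorem strJoin_cons (a : String) (l : List String) :
    PySem.Str.join "" (a :: l) = a ++ PySem.Str.join "" l := by
  apply String.toList_inj.mp
  simp [PySem.Str.toList_join, PySem.Chars.join, interc_nil]

theorem strEmpty_append (s : String) : "" ++ s = s := by
  apply String.toList_inj.mp
  simp

-- the window of cells a fuel-indexed loop sees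
def pvWin (f : Nat → String) (c n : Nat) : List String :=
  (List.range n).map (fun j => f (c + j))

theorem pvWin_succ (f : Nat → String) (c n : Nat) :
    pvWin f c (n+1) = f c :: pvWin f (c+1) n := by
  simp only [pvWin, List.range_succ_eq_map, List.map_cons, List.map_map, Function.comp_def]
  congr 1
  apply List.map_congr_left
  intro a _
  congr 1
  omega

theorem pvWin_drop (f : Nat → String) (c n k : Nat) (h : k ≤ n) :
    (pvWin f c n).drop k = pvWin f (c+k) (n-k) := by
  have hn : n = k + (n - k) := by omega
  rw [pvWin, hn, List.range_add, List.map_append, List.drop_append_of_le_length (by simp)]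
  rw [List.drop_of_length_le (by simp)]
  have h2 : k + (n - k) - k = n - k := by omega
  simp only [List.map_map, Function.comp_def, List.nil_append, pvWin, h2]
  apply List.map_congr_left; intro a _; congr 1; omega

-- reference per-line run finder (proof-only)
def pvRunsOf : List String → List (String × Nat)
  | [] => []
  | x :: xs =>
    if x ≠ "X" then
      let t := xs.takeWhile (fun y => y != "X")
      let s := x ++ PySem.Str.join "" t
      let rest := (pvRunsOf (xs.dropWhile (fun y => y != "X"))).map
        (fun p => (p.1, p.2 + (t.length + 1)))
      if 2 ≤ PySem.Str.len s then (s, 0) :: rest else rest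
    else (pvRunsOf xs).map (fun p => (p.1, p.2 + 1))
  termination_by l => l.length
  decreasing_by
  · have := List.length_dropWhile_le (fun y => y != "X") xs; simp; omega
  · simp

theorem dropWhile_eq_drop_takeWhile {α : Type} (p : α → Bool) (l : List α) :
    l.dropWhile p = l.drop (l.takeWhile p).length := by
  induction l with
  | nil => simp
  | cons x xs ih =>
    by_cases h : p x <;> simp [List.dropWhile_cons, List.takeWhile_cons, h, ih]

-- A side: inner while = takeWhile of the window
theorem pvSegA_eq (f : Nat → String) :
    ∀ (fuel c : Nat) (s0 : String),
      pvSegA f fuel c s0 =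
        (s0 ++ PySem.Str.join "" ((pvWin f c fuel).takeWhile (fun y => y != "X")),
         ((pvWin f c fuel).takeWhile (fun y => y != "X")).length) := by
  intro fuel
  induction fuel with
  | zero =>
    intro c s0
    simp [pvSegA, pvWin, PySem.Str.len_eq, strJoin_nil]
  | succ n ih =>
    intro c s0
    rw [pvWin_succ]
    by_cases h : f c = "X"
    · simp [pvSegA, h, List.takeWhile_cons, strJoin_nil]
    · simp only [pvSegA, h, ne_eq, not_false_iff, if_true, ih (c+1) (s0 ++ f c),
        List.takeWhile_cons, bne_iff_ne, ne_eq, ite_true, List.length_cons]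
      rw [strJoin_cons, String.append_assoc]

-- A side: outer while = reference runs of the window, positions shifted by c
theorem pvLoopA_eq (f : Nat → String) :
    ∀ (fuel c : Nat),
      pvLoopA f fuel c = (pvRunsOf (pvWin f c fuel)).map (fun p => (p.1, p.2 + c)) := by
  intro fuel
  induction fuel using Nat.strong_induction_on with
  | _ fuel ih =>
    match fuel with
    | 0 =>
      intro c
      simp [pvLoopA, pvWin, pvRunsOf]
    | Nat.succ m =>
      intro c
      rw [pvWin_succ]
      by_cases h : f c = "X"
      · rw [pvLoopA, dif_neg (by simp [h]), h, pvRunsOf, if_neg (by simp)]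
        rw [ih m (by omega) (c+1), List.map_map]
        apply List.map_congr_left
        intro p _
        simp [Function.comp]
        omega
      · rw [pvLoopA, dif_pos h, pvSegA_eq f (m+1) c "", pvWin_succ,
            List.takeWhile_cons_of_pos (by simp [h]), strJoin_cons]
        rw [pvRunsOf, if_pos h]
        rw [strEmpty_append]
        set t := (pvWin f (c+1) m).takeWhile (fun y => y != "X") with ht
        have hk : t.length ≤ m := by
          have h1 : t.length ≤ (pvWin f (c+1) m).length := by
            rw [ht]
            exact (List.takeWhile_sublist _).length_le
          simpa [pvWin] using h1
        have hd : (pvWin f (c+1) m).dropWhile (fun y => y != "X")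
            = pvWin f (c+1+t.length) (m - t.length) := by
          rw [dropWhile_eq_drop_takeWhile, ← ht, pvWin_drop f (c+1) m t.length hk]
        have hrw : pvLoopA f (m + 1 - (t.length + 1)) (c + (t.length + 1))
            = ((pvRunsOf ((pvWin f (c+1) m).dropWhile (fun y => y != "X"))).map
                (fun p => (p.1, p.2 + (t.length + 1)))).map (fun p => (p.1, p.2 + c)) := by
          have h1 : m + 1 - (t.length + 1) = m - t.length := by omega
          have h2 : c + (t.length + 1) = c + 1 + t.length := by omega
          rw [h1, h2, ih (m - t.length) (by omega), hd, List.map_map]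
          apply List.map_congr_left
          intro p _
          simp [Function.comp]
          omega
        simp only [List.length_cons]
        split_ifs with hl
        · rw [List.map_cons]
          congr 1
          simp
        · exact hrw

-- separator positions with explicit start offset (proof helper)
def pvSepA (cells : List String) (s : Int) : List Int :=
  (PySem.List.enumerate cells s).filterMap (fun p => if p.2 = "X" then some p.1 else none)

theorem pvSepA_cons (x : String) (xs : List String) (s : Int) :
    pvSepA (x :: xs) s = (if x = "X" then [s] else []) ++ pvSepA xs (s+1) := by
  by_cases h : x = "X" <;> simp [pvSepA, PySem.List.enumerate_cons, List.filterMap_cons, h]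

theorem pvSepA_shift (xs : List String) : ∀ (s : Int), pvSepA xs s = (pvSepA xs 0).map (· + s) := by
  induction xs with
  | nil => intro s; simp [pvSepA]
  | cons x t ih =>
    intro s
    rw [pvSepA_cons, pvSepA_cons, ih (s+1), ih (0+1), List.map_append, List.map_map]
    congr 1
    · by_cases h : x = "X" <;> simp [h]
    · apply List.map_congr_left; intro a _; simp [Function.comp]; ring

theorem pvSepA_none (cells : List String) (h : ∀ y ∈ cells, y ≠ "X") :
    ∀ s, pvSepA cells s = [] := by
  induction cells with
  | nil => intro s; simp [pvSepA]
  | cons x t ih =>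
    intro s
    rw [pvSepA_cons]
    simp only [h x (by simp), if_false]
    exact ih (fun y hy => h y (by simp [hy])) (s+1)

theorem pvSepA_split (pre post : List String) (h : ∀ y ∈ pre, y ≠ "X") :
    ∀ s : Int, pvSepA (pre ++ "X" :: post) s
      = (s + pre.length) :: (pvSepA post 0).map (· + (s + pre.length + 1)) := by
  induction pre with
  | nil =>
    intro s
    rw [List.nil_append, pvSepA_cons, if_pos rfl, pvSepA_shift post (s+1)]
    simp
  | cons y pre' ih =>
    intro s
    rw [List.cons_append, pvSepA_cons, if_neg (h y (by simp)),
        ih (fun z hz => h z (by simp [hz])) (s+1)]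
    simp only [List.nil_append, List.length_cons]
    congr 1
    · push_cast; ring
    · apply List.map_congr_left; intro a _; push_cast; ring

theorem pvSepA_mem (cells : List String) :
    ∀ (s : Int) (i : Int), i ∈ pvSepA cells s → s ≤ i ∧ i < s + cells.length := by
  induction cells with
  | nil => intro s i hi; simp [pvSepA] at hi
  | cons x t ih =>
    intro s i hi
    rw [pvSepA_cons] at hi
    rcases List.mem_append.mp hi with h1 | h2
    · by_cases h : x = "X"
      · simp [h] at h1
        subst h1
        simp only [List.length_cons]
        push_cast
        omega
      · simp [h] at h1
    · have := ih (s+1) i h2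
      simp only [List.length_cons]
      push_cast
      omega

theorem filterMap_eq_map_filterMap {α β γ : Type} (f : α → Option γ) (g : α → Option β)
    (m : β → γ) (l : List α) (h : ∀ x ∈ l, f x = (g x).map m) :
    l.filterMap f = (l.filterMap g).map m := by
  induction l with
  | nil => simp
  | cons x t ih =>
    rw [List.filterMap_cons, List.filterMap_cons, h x (by simp)]
    cases hg : g x with
    | none => simp [ih (fun y hy => h y (by simp [hy]))]
    | some b => simp [ih (fun y hy => h y (by simp [hy]))]

theorem takeWhile_all_ne (l : List String) (h : ∀ y ∈ l, y ≠ "X") :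
    l.takeWhile (fun y => y != "X") = l := by
  induction l with
  | nil => simp
  | cons x t ih =>
    rw [List.takeWhile_cons_of_pos (by simp [h x (by simp)])]
    rw [ih (fun y hy => h y (by simp [hy]))]

theorem takeWhile_split_ne (pre post : List String) (h : ∀ y ∈ pre, y ≠ "X") :
    (pre ++ "X" :: post).takeWhile (fun y => y != "X") = pre := by
  induction pre with
  | nil => simp
  | cons y pre' ih =>
    rw [List.cons_append, List.takeWhile_cons_of_pos (by simp [h y (by simp)])]
    rw [ih (fun z hz => h z (by simp [hz]))]

theorem dropWhile_split_ne (pre post : List String) (h : ∀ y ∈ pre, y ≠ "X") :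
    (pre ++ "X" :: post).dropWhile (fun y => y != "X") = "X" :: post := by
  induction pre with
  | nil => simp
  | cons y pre' ih =>
    rw [List.cons_append, List.dropWhile_cons_of_pos (by simp [h y (by simp)])]
    exact ih (fun z hz => h z (by simp [hz]))

theorem dropWhile_head_false {α : Type} (p : α → Bool) :
    ∀ (l : List α) (x : α) (t : List α), l.dropWhile p = x :: t → p x = false := by
  intro l
  induction l with
  | nil => intro x t h; simp at h
  | cons a l' ih =>
    intro x t h
    by_cases hp : p a
    · rw [List.dropWhile_cons_of_pos hp] at h; exact ih x t h
    · rw [List.dropWhile_cons_of_neg hp] at h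
      cases h; simpa using hp

-- the filterMap body of pvLineB (proof helper)
def pvPairF (cells : List String) (p : Int × Int) : Option (String × Int) :=
  if p.2 - p.1 > 1 then
    if 2 ≤ PySem.Str.len (PySem.Str.join "" (PySem.List.slice cells (some (p.1 + 1)) (some p.2))) then
      some (PySem.Str.join "" (PySem.List.slice cells (some (p.1 + 1)) (some p.2)), p.1 + 1)
    else none
  else none

theorem pvLineB_pairs (cells : List String) :
    pvLineB cells =
      ((-1 :: (pvSepA cells 0 ++ [(cells.length : Int)])).zip
        (pvSepA cells 0 ++ [(cells.length : Int)])).filterMap (pvPairF cells) := rfl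

-- reference runs of an X-free line
theorem pvRunsOf_none (cells : List String) (h : ∀ y ∈ cells, y ≠ "X") :
    pvRunsOf cells = if 2 ≤ PySem.Str.len (PySem.Str.join "" cells)
      then [(PySem.Str.join "" cells, 0)] else [] := by
  cases cells with
  | nil =>
    rw [strJoin_nil]
    simp [pvRunsOf, PySem.Str.len_eq]
  | cons x xs =>
    rw [pvRunsOf, if_pos (h x (by simp)),
        takeWhile_all_ne xs (fun y hy => h y (by simp [hy])),
        List.dropWhile_eq_nil_iff.mpr (fun y hy => by simp [h y (by simp [hy])]),
        strJoin_cons]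
    simp [pvRunsOf]

-- reference runs across the first separator
theorem pvRunsOf_split (pre post : List String) (h : ∀ y ∈ pre, y ≠ "X") :
    pvRunsOf (pre ++ "X" :: post)
      = (if 2 ≤ PySem.Str.len (PySem.Str.join "" pre)
          then [(PySem.Str.join "" pre, 0)] else [])
        ++ (pvRunsOf post).map (fun p => (p.1, p.2 + (pre.length + 1))) := by
  cases pre with
  | nil =>
    rw [strJoin_nil, List.nil_append, pvRunsOf]
    simp [PySem.Str.len_eq]
  | cons y pre' =>
    rw [List.cons_append, pvRunsOf, if_pos (h y (by simp)),
        takeWhile_split_ne pre' post (fun z hz => h z (by simp [hz])),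
        dropWhile_split_ne pre' post (fun z hz => h z (by simp [hz])),
        strJoin_cons, pvRunsOf, if_neg (show ¬("X" : String) ≠ "X" by simp)]
    simp only [List.map_map, List.length_cons, List.singleton_append]
    split_ifs with hl
    · congr 1
      apply List.map_congr_left
      intro p _
      simp [Function.comp]
      omega
    · rw [List.nil_append]
      apply List.map_congr_left
      intro p _
      simp [Function.comp]
      omega

-- slice of an X-free line / shifted slices
theorem slice_full (cells : List String) :
    PySem.List.slice cells (some 0) (some (cells.length : Int)) = cells := by
  have h0 : (0 : Int) = ((0 : Nat) : Int) := rfl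
  rw [h0, PySem.List.slice_natCast]
  simp

theorem slice_shift {α : Type} (u v : List α) (x : α) (a b : Int) (ha : -1 ≤ a) (hb : 0 ≤ b) :
    PySem.List.slice (u ++ x :: v) (some (a + ((u.length : Int) + 1) + 1)) (some (b + ((u.length : Int) + 1)))
      = PySem.List.slice v (some (a + 1)) (some b) := by
  obtain ⟨i, hi⟩ : ∃ i : Nat, a + 1 = (i : Int) := ⟨(a+1).toNat, by omega⟩
  obtain ⟨j, hj⟩ : ∃ j : Nat, b = (j : Int) := ⟨b.toNat, by omega⟩
  have h1 : a + ((u.length : Int) + 1) + 1 = ((u.length + 1 + i : Nat) : Int) := by push_cast; omega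
  have h2 : b + ((u.length : Int) + 1) = ((u.length + 1 + j : Nat) : Int) := by push_cast; omega
  rw [h1, h2, hi, hj, PySem.List.slice_natCast, PySem.List.slice_natCast]
  have hc : u ++ x :: v = (u ++ [x]) ++ v := by simp
  rw [hc]
  have hd : List.drop (u.length + 1 + i) ((u ++ [x]) ++ v) = List.drop i v := by
    have he : u.length + 1 + i = (u ++ [x]).length + i := by simp
    rw [he, List.drop_append]
    simp
  rw [hd]
  congr 1
  omega

-- an X-free line, nonempty: one boundary pair
theorem pvLineB_none (cells : List String) (h : ∀ y ∈ cells, y ≠ "X") :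
    pvLineB cells = (pvRunsOf cells).map (fun p => (p.1, (p.2 : Int))) := by
  cases cells with
  | nil => rw [pvRunsOf]; decide
  | cons x xs =>
    rw [pvLineB_pairs, pvSepA_none (x :: xs) h 0, pvRunsOf_none (x :: xs) h]
    simp only [List.nil_append, List.zip_cons_cons, List.zip_nil_right, List.filterMap_cons,
      List.filterMap_nil]
    rw [pvPairF]
    simp only []
    rw [if_pos (by simp)]
    have h0 : (-1 : Int) + 1 = 0 := by norm_num
    rw [h0, slice_full]
    split_ifs with hl
    · simp
    · simp

-- B side: pvLineB = reference runs (positions cast to Int)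
theorem pvLineB_eq (cells : List String) :
    pvLineB cells = (pvRunsOf cells).map (fun p => (p.1, (p.2 : Int))) := by
  suffices h : ∀ (n : Nat) (cs : List String), cs.length ≤ n →
      pvLineB cs = (pvRunsOf cs).map (fun p => (p.1, (p.2 : Int))) by
    exact h cells.length cells le_rfl
  intro n
  induction n with
  | zero =>
    intro cs hc
    have : cs = [] := List.eq_nil_of_length_eq_zero (by omega)
    subst this
    rw [pvRunsOf]; decide
  | succ n ih =>
    intro cs hc
    by_cases hX : "X" ∈ cs
    · -- split at the first "X"
      have hsplit : cs = cs.takeWhile (fun y => y != "X") ++ cs.dropWhile (fun y => y != "X") :=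
        (List.takeWhile_append_dropWhile).symm
      set pre := cs.takeWhile (fun y => y != "X") with hpred
      have hpre : ∀ y ∈ pre, y ≠ "X" := by
        intro y hy
        have := List.mem_takeWhile_imp hy
        simpa using this
      obtain ⟨post, hdrop⟩ : ∃ post, cs.dropWhile (fun y => y != "X") = "X" :: post := by
        cases e : cs.dropWhile (fun y => y != "X") with
        | nil =>
          exfalso
          have : cs = pre := by rw [hsplit, e, List.append_nil]
          have := hpre "X" (this ▸ hX)
          exact this rfl
        | cons x t =>
          have := dropWhile_head_false (fun y => y != "X") cs x t e
          have hx : x = "X" := by simpa using this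
          exact ⟨t, by rw [hx]⟩
      have hcs : cs = pre ++ "X" :: post := by rw [hsplit, hdrop]
      have hlen : post.length ≤ n := by
        have := congrArg List.length hcs
        simp at this
        omega
      rw [hcs, pvLineB_pairs, pvSepA_split pre post hpre 0, pvRunsOf_split pre post hpre]
      simp only [zero_add]
      -- the bounds list beyond -1 is the shifted bounds list of post
      have hT : (((pre.length : Int) :: (pvSepA post 0).map (· + ((pre.length : Int) + 1)))
          ++ [((pre ++ "X" :: post).length : Int)])
          = ((-1 : Int) :: (pvSepA post 0 ++ [(post.length : Int)])).map
              (· + ((pre.length : Int) + 1)) := by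
        simp only [zero_add, List.map_cons, List.map_append, List.map_map, List.cons_append,
          List.map_nil]
        congr 1
        · ring
        congr 1
        all_goals
          first
          | (apply List.map_congr_left
             intro a _
             simp [Function.comp]
             ring)
          | (congr 1
             simp only [List.length_append, List.length_cons]
             push_cast
             ring)
      rw [hT, List.map_cons, List.zip_cons_cons,
          ← List.map_cons (f := (· + ((pre.length : Int) + 1))) (a := -1)
            (l := pvSepA post 0 ++ [(post.length : Int)]),
          List.zip_map, List.filterMap_cons, List.filterMap_map]
      have htail : List.filterMap
            (pvPairF (pre ++ "X" :: post) ∘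
              (Prod.map (· + ((pre.length : Int) + 1)) (· + ((pre.length : Int) + 1))))
            (((-1 : Int) :: (pvSepA post 0 ++ [(post.length : Int)])).zip
              (pvSepA post 0 ++ [(post.length : Int)]))
          = (List.filterMap (pvPairF post)
              (((-1 : Int) :: (pvSepA post 0 ++ [(post.length : Int)])).zip
                (pvSepA post 0 ++ [(post.length : Int)]))).map
              (fun q => (q.1, q.2 + ((pre.length : Int) + 1))) := by
        apply filterMap_eq_map_filterMap
        rintro ⟨a, b⟩ hq
        obtain ⟨ha', hb'⟩ := List.of_mem_zip hq
        have ha : -1 ≤ a := by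
          rcases List.mem_cons.mp ha' with h1 | h1
          · omega
          · rcases List.mem_append.mp h1 with h2 | h2
            · have := pvSepA_mem post 0 a h2; omega
            · simp at h2; omega
        have hb : 0 ≤ b := by
          rcases List.mem_append.mp hb' with h2 | h2
          · have := pvSepA_mem post 0 b h2; omega
          · simp at h2; omega
        simp only [Function.comp_apply, Prod.map, pvPairF]
        have hc1 : b + ((pre.length : Int)+1) - (a + ((pre.length : Int)+1)) = b - a := by ring
        rw [hc1]
        by_cases hgt : b - a > 1
        · rw [if_pos hgt, if_pos hgt]
          have hsl : PySem.List.slice (pre ++ "X" :: post)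
                (some (a + ((pre.length : Int)+1) + 1)) (some (b + ((pre.length : Int)+1)))
              = PySem.List.slice post (some (a+1)) (some b) := slice_shift pre post "X" a b ha hb
          rw [hsl]
          split_ifs with hl
          · simp only [Option.map_some]
            congr 2
            ring
          · simp
        · rw [if_neg hgt, if_neg hgt]; simp
      rw [htail, ← pvLineB_pairs post, ih post hlen]
      rw [List.map_append]
      have htail2 : (List.map (fun p => (p.1, (p.2 : Int))) (pvRunsOf post)).map
            (fun q => (q.1, q.2 + ((pre.length : Int)+1)))
          = ((pvRunsOf post).map (fun p => (p.1, p.2 + (pre.length + 1)))).map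
            (fun p => (p.1, (p.2 : Int))) := by
        rw [List.map_map, List.map_map]
        apply List.map_congr_left
        intro q _
        simp [Function.comp]
        try push_cast
        try ring
      rw [htail2]
      -- head boundary pair
      rw [pvPairF]
      simp only []
      by_cases hp : pre.length = 0
      · have hpre0 : pre = [] := List.eq_nil_of_length_eq_zero hp
        rw [if_neg (by rw [hpre0]; norm_num)]
        rw [hpre0, strJoin_nil]
        rw [if_neg (by simp [PySem.Str.len_eq])]
        rw [List.map_nil, List.nil_append]
      · rw [if_pos (by push_cast; omega)]
        have e1 : (-1 : Int) + ((pre.length : Int) + 1) = ((pre.length : Nat) : Int) := by ring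
        have e2 : (-1 : Int) + 1 = ((0 : Nat) : Int) := by norm_num
        rw [e1, e2, PySem.List.slice_natCast]
        have e3 : List.take (pre.length - 0) (List.drop 0 (pre ++ "X" :: post)) = pre := by
          simp
        rw [e3]
        split_ifs with hl
        · rw [List.map_cons]
          rfl
        · rw [List.map_nil, List.nil_append]

    · have h' : ∀ y ∈ cs, y ≠ "X" := by
        intro y hy he
        exact hX (he ▸ hy)
      exact pvLineB_none cs h'

-- ===== VERDICT (by name: the statement is the Claim_ definition above) =====
theorem pvLine_agree (f : Nat → String) (n : Nat) :
    pvLineB ((List.range n).map f) = (pvLoopA f n 0).map (fun p => (p.1, (p.2 : Int))) := by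
  have hwin : pvWin f 0 n = (List.range n).map f := by
    simp [pvWin]
  rw [pvLineB_eq, pvLoopA_eq f n 0, ← hwin, List.map_map]
  apply List.map_congr_left
  intro p _
  simp

theorem find_all_runs_spec : Claim_equal_find_all_runs := by
  intro grid size _ _
  unfold Spec_find_all_runs find_all_runs find_all_runs_alt
  simp only [PySem.List.foldl_append_eq_flatMap, List.nil_append]
  congr 1
  · congr 1
    funext r
    rw [pvLine_agree (fun c => (grid.getD r []).getD c "") size.toNat, List.map_map]
    apply List.map_congr_left
    intro p _
    simp
  · congr 1
    funext c
    rw [pvLine_agree (fun r => (grid.getD r []).getD c "") size.toNat, List.map_map]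
    apply List.map_congr_left
    intro p _
    simp
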